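-- pv_equiv track=rewrite | github.com/hawaroaladar1/examples | gffggf/ASD.PY | szuperPrim
-- ===== SOURCE A (Python) =====
-- def isPrim(szam):
--     if szam < 2:
--         return False
--     for i in range(2, szam):
--         if szam % i == 0:
--             return False
--
--     return True
--
-- def szuperPrim(num):
--
--     szuperPrimLista = []
--     sorszam = 0
--
--     for i in range(2, num + 1):
--         if isPrim(i):
--             sorszam = sorszam + 1
--             if isPrim(sorszam):
--                 szuperPrimLista.append(i)
--
--     return szuperPrimLista
-- ===== SOURCE B (Python) =====
-- def _isp(k, primes):
--     # primality check by trial division against the ascending list of known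
--     # primes, stopping at the first prime whose square exceeds k
--     if k < 2:
--         return False
--     for p in primes:
--         if p * p > k:
--             return True
--         if k % p == 0:
--             return False
--     return True
--
-- def szuperPrim(num):
--     primes = []
--     res = []
--     for i in range(2, num + 1):
--         if _isp(i, primes):
--             primes.append(i)
--             if _isp(len(primes), primes):
--                 res.append(i)
--     return res
-- ===== Notes on version B (the rewrite author's own statement) =====
-- stated objective: faster
-- what changed: A trial-divides every candidate by all integers below it; B keeps the ascending list of primes found so far and trial-divides each candidate (and its prime-rank) only by known primes up to its square root, stopping early.
import Mathlib
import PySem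

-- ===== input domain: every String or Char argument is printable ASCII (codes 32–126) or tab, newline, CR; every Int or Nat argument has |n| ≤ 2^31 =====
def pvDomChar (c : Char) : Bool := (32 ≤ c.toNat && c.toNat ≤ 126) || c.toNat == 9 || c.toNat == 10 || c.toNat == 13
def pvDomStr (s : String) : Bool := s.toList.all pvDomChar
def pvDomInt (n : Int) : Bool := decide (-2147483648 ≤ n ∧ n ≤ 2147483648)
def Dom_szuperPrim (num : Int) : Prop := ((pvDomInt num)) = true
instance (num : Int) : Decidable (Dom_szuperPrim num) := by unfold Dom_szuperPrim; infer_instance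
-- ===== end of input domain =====

-- B replaces A's full trial division (every candidate divided by all smaller integers) with
-- trial division by the already-collected primes up to the candidate's square root: faster.

-- ===== PORT A =====
-- literal port of isPrim: the early-return loop over range(2, szam) becomes List.any
def isPrim (szam : Int) : Bool :=
  if szam < 2 then false
  else if (PySem.List.pyRange 2 szam 1).any (fun i => PySem.Int.mod szam i == 0) then false
  else true

-- one iteration of A's for-loop body; state = (szuperPrimLista, sorszam)
def stepA (st : List Int × Int) (i : Int) : List Int × Int :=
  if isPrim i then
    if isPrim (st.2 + 1) then (st.1 ++ [i], st.2 + 1) else (st.1, st.2 + 1)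
  else st

def szuperPrim (num : Int) : List Int :=
  ((PySem.List.pyRange 2 (num + 1) 1).foldl stepA (([] : List Int), (0 : Int))).1

-- ===== PORT B =====
-- literal port of _isp's for-loop (break at first prime whose square exceeds k)
def checkDiv (k : Int) : List Int → Bool
  | [] => true
  | p :: ps =>
    if p * p > k then true
    else if PySem.Int.mod k p == 0 then false
    else checkDiv k ps

def isp (k : Int) (primes : List Int) : Bool :=
  if k < 2 then false else checkDiv k primes

-- one iteration of B's for-loop body; state = (primes, res)
def stepB (st : List Int × List Int) (i : Int) : List Int × List Int :=
  if isp i st.1 then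
    let primes' := st.1 ++ [i]
    if isp ((primes'.length : Int)) primes' then (primes', st.2 ++ [i]) else (primes', st.2)
  else st

def szuperPrim_alt (num : Int) : List Int :=
  ((PySem.List.pyRange 2 (num + 1) 1).foldl stepB (([] : List Int), ([] : List Int))).2

-- ===== PRECONDITION & SPEC =====
def Spec_szuperPrim (num : Int) (out : List Int) : Prop := out = szuperPrim_alt num
instance (num : Int) (out : List Int) : Decidable (Spec_szuperPrim num out) := by unfold Spec_szuperPrim; infer_instance

-- ===== CLAIM (what is proved, stated in full; the proofs are below) =====
def Claim_equal_szuperPrim : Prop := ∀ (num : Int), Dom_szuperPrim num → Spec_szuperPrim num (szuperPrim num)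

-- ===== LEMMAS AND PROOFS =====

-- A's primality test agrees with Nat.Prime
lemma isPrim_iff (n : Int) : isPrim n = true ↔ (2 ≤ n ∧ Nat.Prime n.toNat) := by
  unfold isPrim
  by_cases hn : n < 2
  · simp [hn]
  · simp only [hn, if_false]
    have hrange : ∀ i : Int, i ∈ PySem.List.pyRange 2 n 1 ↔ 2 ≤ i ∧ i < n :=
      fun i => PySem.List.mem_pyRange_one
    constructor
    · intro h
      refine ⟨by omega, ?_⟩
      rw [Nat.prime_def_lt]
      refine ⟨by omega, ?_⟩
      intro m hm hdm
      by_contra hm1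
      have hm0 : m ≠ 0 := by
        rintro rfl
        have := Nat.eq_zero_of_zero_dvd hdm
        omega
      have hm2 : 2 ≤ m := by omega
      have hdvd : (m : Int) ∣ n := by
        have : (m : Int) ∣ (n.toNat : Int) := Int.natCast_dvd_natCast.mpr hdm
        rwa [Int.toNat_of_nonneg (by omega)] at this
      have hmem : (m : Int) ∈ PySem.List.pyRange 2 n 1 := by
        rw [hrange]
        constructor
        · exact_mod_cast hm2
        · omega
      have : (PySem.List.pyRange 2 n 1).any (fun i => PySem.Int.mod n i == 0) = true := by
        rw [List.any_eq_true]
        exact ⟨(m : Int), hmem, by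
          simp only [beq_iff_eq]
          exact (PySem.Int.mod_eq_zero_iff_dvd n (m : Int)).mpr hdvd⟩
      simp [this] at h
    · rintro ⟨h2, hp⟩
      have : (PySem.List.pyRange 2 n 1).any (fun i => PySem.Int.mod n i == 0) = false := by
        rw [List.any_eq_false]
        intro i hi
        rw [hrange] at hi
        simp only [beq_iff_eq]
        rw [PySem.Int.mod_eq_zero_iff_dvd]
        intro hdvd
        have hdn : i.toNat ∣ n.toNat := by
          apply Int.natCast_dvd_natCast.mp
          rw [Int.toNat_of_nonneg (by omega : (0:Int) ≤ i), Int.toNat_of_nonneg (by omega : (0:Int) ≤ n)]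
          exact hdvd
        have := (Nat.prime_def_lt.mp hp).2 i.toNat (by omega) hdn
        omega
      simp [this]

-- composite numbers have a prime divisor whose square is bounded by the number
lemma no_small_prime_dvd (k : Int) (hk : 2 ≤ k)
    (h : ∀ q : Int, 2 ≤ q → q * q ≤ k → q ∣ k → Nat.Prime q.toNat → False) :
    Nat.Prime k.toNat := by
  by_contra hnp
  set n := k.toNat with hn
  have hn2 : 2 ≤ n := by omega
  have hq := Nat.minFac_prime (by omega : n ≠ 1)
  have hsq : n.minFac ^ 2 ≤ n := Nat.minFac_sq_le_self (by omega) hnp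
  have hdv : n.minFac ∣ n := Nat.minFac_dvd n
  apply h (n.minFac : Int)
  · exact_mod_cast hq.two_le
  · have : ((n.minFac : Int)) * (n.minFac : Int) = ((n.minFac ^ 2 : Nat) : Int) := by
      push_cast; ring
    rw [this]
    calc ((n.minFac ^ 2 : Nat) : Int) ≤ (n : Int) := by exact_mod_cast hsq
      _ = k := by omega
  · have : (n.minFac : Int) ∣ (n : Int) := Int.natCast_dvd_natCast.mpr hdv
    have hnk : (n : Int) = k := by omega
    rwa [hnk] at this
  · simpa using hq

lemma not_prime_of_dvd (k p : Int) (hk : 2 ≤ k) (hp : 2 ≤ p) (hpk : p * p ≤ k) (hd : p ∣ k) :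
    ¬ Nat.Prime k.toNat := by
  intro hp
  have hpk' : p < k := by nlinarith
  have hdn : p.toNat ∣ k.toNat := by
    apply Int.natCast_dvd_natCast.mp
    rw [Int.toNat_of_nonneg (by omega : (0:Int) ≤ p), Int.toNat_of_nonneg (by omega : (0:Int) ≤ k)]
    exact hd
  have := (Nat.prime_def_lt.mp hp).2 p.toNat (by omega) hdn
  omega

-- correctness of B's bounded trial division
lemma checkDiv_iff (L : List Int) (k : Int) (hk : 2 ≤ k)
    (hs : L.Pairwise (· < ·)) (h2 : ∀ p ∈ L, 2 ≤ p)
    (hc : ∀ q : Int, 2 ≤ q → q * q ≤ k → q ∣ k → Nat.Prime q.toNat → q ∈ L) :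
    (checkDiv k L = true ↔ Nat.Prime k.toNat) := by
  induction L with
  | nil =>
    simp only [checkDiv, true_iff]
    apply no_small_prime_dvd k hk
    intro q h1 h2' h3 h4
    simpa using hc q h1 h2' h3 h4
  | cons p ps ih =>
    have hp2 : 2 ≤ p := h2 p (List.mem_cons_self)
    have hlt : ∀ q ∈ ps, p < q := fun q hq => (List.pairwise_cons.mp hs).1 q hq
    by_cases hbr : p * p > k
    · simp only [checkDiv, hbr, if_true, true_iff]
      apply no_small_prime_dvd k hk
      intro q h1 h2' h3 h4
      have hq : q ∈ p :: ps := hc q h1 h2' h3 h4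
      have hpq : p ≤ q := by
        rcases List.mem_cons.mp hq with h | h
        · omega
        · exact le_of_lt (hlt q h)
      nlinarith
    · by_cases hdv : p ∣ k
      · have hmod : (PySem.Int.mod k p == 0) = true := by
          simp only [beq_iff_eq]
          exact (PySem.Int.mod_eq_zero_iff_dvd k p).mpr hdv
        simp only [checkDiv, hbr, if_false, hmod, if_true]
        simp only [Bool.false_eq_true, false_iff]
        exact not_prime_of_dvd k p hk hp2 (by omega) hdv
      · have hmod : (PySem.Int.mod k p == 0) = false := by
          simp only [beq_eq_false_iff_ne, ne_eq]
          rw [PySem.Int.mod_eq_zero_iff_dvd]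
          exact hdv
        simp only [checkDiv, hbr, if_false, hmod]
        apply ih (List.pairwise_cons.mp hs).2 (fun q hq => h2 q (List.mem_cons_of_mem p hq))
        intro q h1 h2' h3 h4
        have hq : q ∈ p :: ps := hc q h1 h2' h3 h4
        rcases List.mem_cons.mp hq with h | h
        · subst h; exact absurd h3 hdv
        · exact h

-- all primes in [2, m]
def primesUpTo (m : Int) : List Int :=
  (PySem.List.pyRange 2 (m + 1) 1).filter (fun i => isPrim i)

lemma mem_primesUpTo (m q : Int) :
    q ∈ primesUpTo m ↔ (2 ≤ q ∧ q < m + 1 ∧ Nat.Prime q.toNat) := by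
  unfold primesUpTo
  rw [List.mem_filter, PySem.List.mem_pyRange_one, isPrim_iff]
  constructor
  · rintro ⟨⟨h1, h2⟩, _, h3⟩; exact ⟨h1, h2, h3⟩
  · rintro ⟨h1, h2, h3⟩; exact ⟨⟨h1, h2⟩, h1, h3⟩

lemma isp_primesUpTo (m k : Int) (hkm : k ≤ m + 1) :
    isp k (primesUpTo m) = isPrim k := by
  by_cases hk : k < 2
  · unfold isp isPrim
    simp [hk]
  · have hk2 : 2 ≤ k := by omega
    have hs : (primesUpTo m).Pairwise (· < ·) :=
      List.Pairwise.sublist (List.filter_sublist) (PySem.List.pairwise_lt_pyRange_one 2 (m+1))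
    have h2 : ∀ p ∈ primesUpTo m, 2 ≤ p := fun p hp => ((mem_primesUpTo m p).mp hp).1
    have hc : ∀ q : Int, 2 ≤ q → q * q ≤ k → q ∣ k → Nat.Prime q.toNat → q ∈ primesUpTo m := by
      intro q h1 h2' h3 h4
      rw [mem_primesUpTo]
      refine ⟨h1, by nlinarith, h4⟩
    have hb : isp k (primesUpTo m) = checkDiv k (primesUpTo m) := by
      unfold isp; simp [hk]
    rw [hb]
    have h1 := checkDiv_iff (primesUpTo m) k hk2 hs h2 hc
    have h2' := isPrim_iff k
    rw [Bool.eq_iff_iff, h1, h2']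
    constructor
    · intro h; exact ⟨hk2, h⟩
    · rintro ⟨_, h⟩; exact h

def AState (m : Int) : List Int × Int :=
  (PySem.List.pyRange 2 (m + 1) 1).foldl stepA (([] : List Int), (0 : Int))
def BState (m : Int) : List Int × List Int :=
  (PySem.List.pyRange 2 (m + 1) 1).foldl stepB (([] : List Int), ([] : List Int))

lemma inv (k : Nat) :
    (AState (1 + k)).1 = (BState (1 + k)).2 ∧
    (AState (1 + k)).2 = ((BState (1 + k)).1.length : Int) ∧
    (BState (1 + k)).1 = primesUpTo (1 + k) := by
  induction k with
  | zero =>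
    refine ⟨?_, ?_, ?_⟩ <;> decide
  | succ n ih =>
    obtain ⟨e1, e2, e3⟩ := ih
    set m : Int := 1 + (n : Int) with hm
    have hm1 : (1 : Int) ≤ m := by omega
    have hcast : (1 : Int) + ((n + 1 : Nat) : Int) = m + 1 := by push_cast; ring
    rw [hcast]
    have hrange : PySem.List.pyRange 2 (m + 1 + 1) 1
        = PySem.List.pyRange 2 (m + 1) 1 ++ [m + 1] :=
      PySem.List.pyRange_one_succ_right (by omega)
    have hA : AState (m + 1) = stepA (AState m) (m + 1) := by
      unfold AState; rw [hrange, List.foldl_append]; rfl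
    have hB : BState (m + 1) = stepB (BState m) (m + 1) := by
      unfold BState; rw [hrange, List.foldl_append]; rfl
    have hP : primesUpTo (m + 1)
        = primesUpTo m ++ (if isPrim (m + 1) then [m + 1] else []) := by
      unfold primesUpTo
      rw [hrange, List.filter_append]
      by_cases h : isPrim (m + 1) <;> simp [h]
    have houter : isp (m + 1) (BState m).1 = isPrim (m + 1) := by
      rw [e3]; exact isp_primesUpTo m (m + 1) le_rfl
    have hlen : ((primesUpTo m).length : Int) ≤ m - 1 := by
      have h1 : (primesUpTo m).length ≤ (PySem.List.pyRange 2 (m + 1) 1).length :=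
        List.length_filter_le _ _
      rw [PySem.List.length_pyRange_one] at h1
      omega
    rw [hA, hB]
    unfold stepA stepB
    by_cases hpm : isPrim (m + 1)
    · have hP' : primesUpTo (m + 1) = primesUpTo m ++ [m + 1] := by
        rw [hP, if_pos hpm]
      have hrank : (((BState m).1 ++ [m + 1]).length : Int) = (AState m).2 + 1 := by
        simp only [List.length_append, List.length_cons, List.length_nil, e3, e2]
        push_cast
        ring
      have hrk : isp (((BState m).1 ++ [m + 1]).length : Int) ((BState m).1 ++ [m + 1])
          = isPrim ((AState m).2 + 1) := by
        rw [hrank, e3, ← hP']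
        apply isp_primesUpTo
        rw [e2, e3]
        omega
      simp only [hpm, houter, if_true, hrk]
      by_cases hr : isPrim ((AState m).2 + 1)
      · simp only [hr, if_true]
        exact ⟨by simp [e1], hrank.symm, by simp [e3, hP']⟩
      · have hr' : isPrim ((AState m).2 + 1) = false := by simp [hr]
        simp only [hr', Bool.false_eq_true, if_false]
        exact ⟨e1, hrank.symm, by simp [e3, hP']⟩
    · have hpm' : isPrim (m + 1) = false := by simp [hpm]
      simp only [houter, hpm', Bool.false_eq_true, if_false]
      have hP' : primesUpTo (m + 1) = primesUpTo m := by
        rw [hP, if_neg hpm, List.append_nil]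
      exact ⟨e1, e2, by rw [hP', e3]⟩

-- ===== VERDICT (by name: the statement is the Claim_ definition above) =====
theorem szuperPrim_spec : Claim_equal_szuperPrim := by
  intro num _
  unfold Spec_szuperPrim szuperPrim szuperPrim_alt
  by_cases h : num ≤ 1
  · rw [PySem.List.pyRange_one_eq_nil (by omega)]; rfl
  · have h2 : 1 + ((num - 1).toNat : Int) = num := by omega
    have := inv (num - 1).toNat
    rw [h2] at this
    exact this.1
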